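-- pv_equiv track=rewrite | github.com/fgolemo/mcdp | src/mcdp_report/out_mcdpl.py | extract_ws
-- ===== SOURCE A (Python) =====
-- def extract_ws(s, ws_chars = [' ', '\n', '\t']):
--     """ Return initial, x, final such that initial + x + final = s """
--     if not s:
--         return '', '', ''
--
--     assert len(s) >= 1
--
--     i = 0
--     is_ws = lambda x: x in ws_chars
--
--     # i is the first character that is not a whitespace
--     while i < len(s) and is_ws(s[i]):
--         i += 1
--
--     # now we know the initial string
--     initial = s[:i]
--
--     # rest of the string (middle + final)
--     rest = s[i:]
--
--     len_final = 0
--     while len_final < len(rest) and is_ws(rest[len(rest)-len_final-1]):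
--         len_final += 1
--
--     final = s[len(s)-len_final:]
--     middle = s[i:len(s)-len_final]
--     recombine = initial + middle + final
--
--     assert recombine == s, (s, initial, middle, final)
--
--     return initial, middle, final
-- ===== SOURCE B (Python) =====
-- def extract_ws(s, ws_chars=[' ', '\n', '\t']):
--     """ Return initial, x, final such that initial + x + final = s """
--     idx = [i for i, c in enumerate(s) if c not in ws_chars]
--     if not idx:
--         return s, '', ''
--     first, last = idx[0], idx[-1]
--     return s[:first], s[first:last + 1], s[last + 1:]
-- ===== Notes on version B (the rewrite author's own statement) =====
-- stated objective: simpler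
-- what changed: Replaces the two index-walking while loops (forward from 0, backward from the end) by one forward enumerate pass collecting the indices of non-whitespace characters, slicing at the first and last such index; the empty-index branch covers both the empty and the all-whitespace string.
import Mathlib
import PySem

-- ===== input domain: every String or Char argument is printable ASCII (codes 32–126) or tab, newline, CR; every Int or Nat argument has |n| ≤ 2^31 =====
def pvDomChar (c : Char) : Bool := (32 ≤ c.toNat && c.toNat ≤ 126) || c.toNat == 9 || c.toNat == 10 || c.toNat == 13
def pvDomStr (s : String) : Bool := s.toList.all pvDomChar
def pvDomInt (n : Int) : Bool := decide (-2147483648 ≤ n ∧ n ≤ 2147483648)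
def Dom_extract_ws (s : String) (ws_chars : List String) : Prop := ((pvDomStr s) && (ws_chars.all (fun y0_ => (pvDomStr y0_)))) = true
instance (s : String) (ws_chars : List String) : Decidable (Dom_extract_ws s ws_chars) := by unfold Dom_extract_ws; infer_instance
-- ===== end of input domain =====

-- B replaces A's two index-walking while loops by one forward pass collecting the
-- indices of non-whitespace characters and slicing at the first and last one (simpler).

-- ===== PORT A =====

-- the `while i < len(s) and is_ws(s[i]): i += 1` forward scan: number of leading
-- characters satisfying p (structural recursion over the character list)
def leadCount (p : Char → Bool) : List Char → Nat
  | [] => 0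
  | c :: t => if p c then leadCount p t + 1 else 0

-- port of A; strings are handled as their character lists (slices s[:i], s[i:k], s[k:]
-- with 0 ≤ i ≤ k ≤ len(s) are take/drop, exact here since all bounds are in range);
-- the backward scan `while len_final < len(rest) and is_ws(rest[len(rest)-len_final-1])`
-- is the forward scan over rest.reverse.
def extract_ws (s : String) (ws_chars : List String) : String × String × String :=
  if s = "" then ("", "", "") else
    let cs := s.toList
    let is_ws := fun c => ws_chars.contains (String.ofList [c])   -- `x in ws_chars` on the 1-char string
    let i := leadCount is_ws cs
    let initial := cs.take i
    let rest := cs.drop i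
    let len_final := leadCount is_ws rest.reverse
    let n := cs.length
    (String.ofList initial, String.ofList ((cs.drop i).take (n - len_final - i)),
      String.ofList (cs.drop (n - len_final)))

-- ===== PORT B =====

-- `[i for i, c in enumerate(s) if c not in ws_chars]` (indices are the Nat positions)
def nonWsIdx (is_ws : Char → Bool) : List Char → Nat → List Nat
  | [], _ => []
  | c :: t, k => if is_ws c then nonWsIdx is_ws t (k + 1) else k :: nonWsIdx is_ws t (k + 1)

def extract_ws_alt (s : String) (ws_chars : List String) : String × String × String :=
  let cs := s.toList
  let is_ws := fun c => ws_chars.contains (String.ofList [c])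
  let idx := nonWsIdx is_ws cs 0
  match idx.head?, idx.getLast? with
  | some first, some last =>
      (String.ofList (cs.take first), String.ofList ((cs.drop first).take (last + 1 - first)),
        String.ofList (cs.drop (last + 1)))
  | _, _ => (s, "", "")

-- ===== PRECONDITION & SPEC =====
def Spec_extract_ws (s : String) (ws_chars : List String) (out : String × String × String) : Prop := out = extract_ws_alt s ws_chars
instance (s : String) (ws_chars : List String) (out : String × String × String) : Decidable (Spec_extract_ws s ws_chars out) := by unfold Spec_extract_ws; infer_instance

-- ===== CLAIM (what is proved, stated in full; the proofs are below) =====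
def Claim_equal_extract_ws : Prop := ∀ (s : String) (ws_chars : List String), Dom_extract_ws s ws_chars → Spec_extract_ws s ws_chars (extract_ws s ws_chars)

-- ===== LEMMAS AND PROOFS =====

theorem leadCount_of_all (p : Char → Bool) (xs : List Char) (h : xs.all p = true) :
    leadCount p xs = xs.length := by
  induction xs with
  | nil => rfl
  | cons c t ih =>
    simp only [List.all_cons, Bool.and_eq_true] at h
    simp [leadCount, h.1, ih h.2]

theorem leadCount_lt (p : Char → Bool) (xs : List Char) (h : xs.all p = false) :
    leadCount p xs < xs.length := by
  induction xs with
  | nil => simp at h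
  | cons c t ih =>
    simp only [List.all_cons, Bool.and_eq_false_iff] at h
    simp only [leadCount, List.length_cons]
    rcases h with h | h
    · simp [h]
    · have := ih h; split <;> omega

theorem all_take_leadCount (p : Char → Bool) (xs : List Char) :
    (xs.take (leadCount p xs)).all p = true := by
  induction xs with
  | nil => rfl
  | cons c t ih =>
    simp only [leadCount]
    by_cases hc : p c = true
    · simp [hc, ih]
    · simp [hc]

theorem leadCount_append_of_not_all (p : Char → Bool) (xs ys : List Char)
    (h : xs.all p = false) : leadCount p (xs ++ ys) = leadCount p xs := by
  induction xs with
  | nil => simp at h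
  | cons c t ih =>
    simp only [List.all_cons, Bool.and_eq_false_iff] at h
    rcases h with h | h
    · simp [leadCount, h]
    · by_cases hc : p c = true
      · simp [leadCount, hc, ih h]
      · simp [leadCount, hc]

theorem leadCount_append_of_all (p : Char → Bool) (xs ys : List Char)
    (h : xs.all p = true) : leadCount p (xs ++ ys) = xs.length + leadCount p ys := by
  induction xs with
  | nil => simp
  | cons c t ih =>
    simp only [List.all_cons, Bool.and_eq_true] at h
    simp [leadCount, h.1, ih h.2]
    omega

theorem nonWsIdx_eq_nil_iff (p : Char → Bool) (xs : List Char) (k : Nat) :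
    nonWsIdx p xs k = [] ↔ xs.all p = true := by
  induction xs generalizing k with
  | nil => simp [nonWsIdx]
  | cons c t ih =>
    simp only [nonWsIdx, List.all_cons, Bool.and_eq_true]
    by_cases hc : p c = true
    · simp [hc, ih]
    · simp [hc]

theorem nonWsIdx_head (p : Char → Bool) (xs : List Char) (k : Nat) (h : xs.all p = false) :
    (nonWsIdx p xs k).head? = some (k + leadCount p xs) := by
  induction xs generalizing k with
  | nil => simp at h
  | cons c t ih =>
    simp only [List.all_cons, Bool.and_eq_false_iff] at h
    by_cases hc : p c = true
    · have ht : t.all p = false := by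
        rcases h with h | h
        · rw [hc] at h; simp at h
        · exact h
      simp only [nonWsIdx, hc, if_true, leadCount]
      rw [ih (k + 1) ht]
      congr 1; omega
    · simp [nonWsIdx, hc, leadCount]

theorem nonWsIdx_getLast (p : Char → Bool) (xs : List Char) (k : Nat) (h : xs.all p = false) :
    (nonWsIdx p xs k).getLast? = some (k + (xs.length - 1 - leadCount p xs.reverse)) := by
  induction xs generalizing k with
  | nil => simp at h
  | cons c t ih =>
    by_cases ht : t.all p = true
    · -- then c is the unique "last" non-ws marker position k, and p c = false
      have hc : p c = false := by
        simp only [List.all_cons, Bool.and_eq_false_iff] at h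
        rcases h with h | h
        · exact h
        · exact absurd ht (by simp [h])
      have htnil : nonWsIdx p t (k + 1) = [] := (nonWsIdx_eq_nil_iff p t (k + 1)).mpr ht
      have hrev : t.reverse.all p = true := by simpa using ht
      have : leadCount p (c :: t).reverse = t.length := by
        simp only [List.reverse_cons]
        rw [leadCount_append_of_all p t.reverse [c] hrev]
        simp [leadCount, hc]
      rw [this]
      simp [nonWsIdx, hc, htnil]
    · have ht' : t.all p = false := by simpa using ht
      have hrev : t.reverse.all p = false := by simpa using ht'
      have hlt : leadCount p t.reverse < t.length := by
        have := leadCount_lt p t.reverse hrev; simpa using this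
      have htail : leadCount p (c :: t).reverse = leadCount p t.reverse := by
        simp only [List.reverse_cons]
        exact leadCount_append_of_not_all p t.reverse [c] hrev
      rw [htail]
      have hrec := ih (k + 1) ht'
      by_cases hc : p c = true
      · simp only [nonWsIdx, hc, if_true]
        rw [hrec]; congr 1; simp only [List.length_cons]; omega
      · simp only [nonWsIdx, hc, if_false, Bool.false_eq_true]
        have hne : nonWsIdx p t (k + 1) ≠ [] := by
          intro hnil; exact absurd ((nonWsIdx_eq_nil_iff p t (k + 1)).mp hnil) (by simp [ht'])
        rcases List.exists_cons_of_ne_nil hne with ⟨a, l, hl⟩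
        rw [hl, List.getLast?_cons_cons, ← hl, hrec]
        congr 1; simp only [List.length_cons]; omega

-- trailing-whitespace count of rest = s[i:] equals the trailing count of s itself
theorem trail_rest (p : Char → Bool) (xs : List Char) (h : xs.all p = false) :
    leadCount p ((xs.drop (leadCount p xs)).reverse) = leadCount p xs.reverse := by
  have hsplit : xs = xs.take (leadCount p xs) ++ xs.drop (leadCount p xs) :=
    (List.take_append_drop _ xs).symm
  have hdropall : (xs.drop (leadCount p xs)).all p = false := by
    by_contra hcontra
    have hd : (xs.drop (leadCount p xs)).all p = true := by
      cases hx : (xs.drop (leadCount p xs)).all p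
      · exact absurd hx hcontra
      · rfl
    have : xs.all p = true := by
      rw [hsplit, List.all_append, all_take_leadCount, hd]; rfl
    simp [this] at h
  have hrevall : (xs.drop (leadCount p xs)).reverse.all p = false := by simpa using hdropall
  conv_rhs => rw [hsplit]
  rw [List.reverse_append]
  exact (leadCount_append_of_not_all p _ _ hrevall).symm

-- ===== VERDICT (by name: the statement is the Claim_ definition above) =====
theorem extract_ws_spec : Claim_equal_extract_ws := by
  intro s ws_chars _
  unfold Spec_extract_ws extract_ws extract_ws_alt
  set p := fun c => ws_chars.contains (String.ofList [c]) with hp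
  by_cases hs : s = ""
  · subst hs
    simp [nonWsIdx]
  · simp only [hs, if_false]
    by_cases hall : s.toList.all p = true
    · -- all characters whitespace: A returns (s, "", ""), B's index list is empty
      have hlead := leadCount_of_all p s.toList hall
      have hnil : nonWsIdx p s.toList 0 = [] := (nonWsIdx_eq_nil_iff p s.toList 0).mpr hall
      have hd : s.toList.drop s.length = [] := by simp
      have htk : s.toList.take s.length = s.toList := by simp
      simp [hnil, hlead, hd, htk, leadCount]
    · have hall' : s.toList.all p = false := by simpa using hall
      have hhead := nonWsIdx_head p s.toList 0 hall'
      have hlast := nonWsIdx_getLast p s.toList 0 hall'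
      have htrail := trail_rest p s.toList hall'
      simp only [Nat.zero_add] at hhead hlast
      simp only [hhead, hlast, htrail]
      have hf := leadCount_lt p s.toList hall'
      have htl : leadCount p s.toList.reverse < s.toList.length := by
        have : s.toList.reverse.all p = false := by simpa using hall'
        have := leadCount_lt p s.toList.reverse this
        simpa using this
      have e1 : s.toList.length - 1 - leadCount p s.toList.reverse + 1 - leadCount p s.toList
          = s.toList.length - leadCount p s.toList.reverse - leadCount p s.toList := by omega
      have e2 : s.toList.length - 1 - leadCount p s.toList.reverse + 1
          = s.toList.length - leadCount p s.toList.reverse := by omega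
      rw [e1, e2]
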